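-- pv_equiv track=rewrite | github.com/gyjames/Fungen | script/correct_reads.py | extract_heaviest_path
-- ===== SOURCE A (Python) =====
-- def extract_heaviest_path(sv_lst):
-- 	connected_reads = []
-- 	sv_lst_len = len(sv_lst)
-- 	for sv_site_i in range(sv_lst_len - 1):
-- 		site_lo1, site_sv_lst1 = sv_lst[sv_site_i]
-- 		site_lo2, site_sv_lst2 = sv_lst[sv_site_i + 1]
-- 		connected_reads_new = []
-- 		for nt_site2, read_lst2 in site_sv_lst2:
-- 			site2_path = []
-- 			for nt_site1, read_lst1 in site_sv_lst1:
-- 				if site_lo1 == '|' or site_lo2 == '|':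
-- 					continue
-- 				read_lst_ttl = read_lst1 + read_lst2
-- 				overlap_num = len(read_lst_ttl) - len(list(set(read_lst_ttl)))
-- 				if sv_site_i == 0:
-- 					site2_path.append([[(site_lo1, nt_site1), (site_lo2, nt_site2)], overlap_num])
-- 				else:
-- 					for cr_num in range(len(connected_reads)):
-- 						if connected_reads[cr_num][0][-1] == (site_lo1, nt_site1):
-- 							path_extend = list(connected_reads[cr_num][0])
-- 							path_extend.append((site_lo2, nt_site2))
-- 							path_weight = connected_reads[cr_num][1] + overlap_num
-- 							site2_path.append([path_extend, path_weight])
-- 			if site2_path != []: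
-- 				site2_path.sort(key = lambda x:x[-1], reverse = True)
-- 				connected_reads_new.append(site2_path[0])
-- 		connected_reads = connected_reads_new
-- 	connected_reads.sort(key = lambda x:x[-1], reverse = True)
-- 	if connected_reads != []:
-- 		heaviest_path = connected_reads[0][0]
-- 	else:
-- 		heaviest_path = []
-- 	return heaviest_path
-- ===== SOURCE B (Python) =====
-- def _overlap(rl1, rl2):
--     ttl = rl1 + rl2
--     return len(ttl) - len(set(ttl))
--
-- def extract_heaviest_path(sv_lst):
--     # Weight-only DP with parent-pointer chains: no path lists are ever copied,
--     # and a single '|' site (or fewer than two sites) empties every layer in A,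
--     # so it is short-circuited up front. The one answer path is rebuilt
--     # backwards from the winning chain at the end.
--     if len(sv_lst) < 2 or any(lo == '|' for lo, _ in sv_lst):
--         return []
--     lo0, site0 = sv_lst[0]
--     prev = [(lo0, nt, 0, None) for nt, _ in site0]
--     for (lo1, site1), (lo2, site2) in zip(sv_lst, sv_lst[1:]):
--         best_at = {}
--         for e in prev:
--             b = best_at.get(e[1])
--             if b is None or b[2] < e[2]:
--                 best_at[e[1]] = e
--         cur = []
--         for nt2, rl2 in site2:
--             best = None
--             for nt1, rl1 in site1:
--                 e = best_at.get(nt1)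
--                 if e is None:
--                     continue
--                 w = e[2] + _overlap(rl1, rl2)
--                 if best is None or best[2] < w:
--                     best = (lo2, nt2, w, e)
--             if best is not None:
--                 cur.append(best)
--         prev = cur
--     best = None
--     for e in prev:
--         if best is None or best[2] < e[2]:
--             best = e
--     path = []
--     while best is not None:
--         path.append((best[0], best[1]))
--         best = best[3]
--     path.reverse()
--     return path
-- ===== Notes on version B (the rewrite author's own statement) =====
-- stated objective: faster
-- what changed: B stores no path lists at all: it runs a weight-only DP over parent-pointer chains (one tuple per layer node linking to its chosen predecessor), indexes the previous layer by its last node, short-circuits to an empty path when there are fewer than two sites or any site label is '|' (which provably empties every layer of A), and reconstructs only the single winning path backwards at the end, instead of A's copying of every partial path and stable-sorting every candidate list per node.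
import Mathlib
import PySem

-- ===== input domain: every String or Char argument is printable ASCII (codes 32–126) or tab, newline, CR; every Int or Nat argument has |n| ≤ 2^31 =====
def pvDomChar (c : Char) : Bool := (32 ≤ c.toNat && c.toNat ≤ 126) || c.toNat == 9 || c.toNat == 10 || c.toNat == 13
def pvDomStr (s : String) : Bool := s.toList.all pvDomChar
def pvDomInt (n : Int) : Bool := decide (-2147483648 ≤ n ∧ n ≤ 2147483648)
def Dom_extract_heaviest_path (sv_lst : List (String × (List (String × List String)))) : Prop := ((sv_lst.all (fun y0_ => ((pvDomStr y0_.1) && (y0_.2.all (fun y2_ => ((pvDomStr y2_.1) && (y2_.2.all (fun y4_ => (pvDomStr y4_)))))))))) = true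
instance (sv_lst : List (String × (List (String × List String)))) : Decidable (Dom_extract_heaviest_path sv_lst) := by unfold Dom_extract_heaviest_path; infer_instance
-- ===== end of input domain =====

-- B replaces A's path-list DP (every layer keeps full path copies, each candidate
-- list stable-sorted) by a weight-only DP over parent-pointer chains with a
-- per-last-node index, a short-circuit for '|' sites (which provably empty A's
-- layers so both return an empty path), and a single backwards reconstruction of the winning path (objective: faster).

-- ===== PORT A =====
-- overlap_num = len(read_lst1 + read_lst2) - len(set(read_lst1 + read_lst2))
def pvA_ov (rl1 rl2 : List String) : Int :=
  ((rl1 ++ rl2).length : Int) - ((PySem.Set.ofList (rl1 ++ rl2)).length : Int)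

-- the inner two loops building site2_path for one (nt_site2, read_lst2)
def pvA_site2path (first : Bool) (cr : List (List (String × String) × Int))
    (lo1 lo2 : String) (site1 : List (String × List String))
    (nt2 : String) (rl2 : List String) : List (List (String × String) × Int) :=
  site1.foldl (fun acc p =>
    if lo1 == "|" || lo2 == "|" then acc
    else
      if first then
        acc ++ [([(lo1, p.1), (lo2, nt2)], pvA_ov p.2 rl2)]
      else
        cr.foldl (fun acc2 c =>
          if PySem.List.pyGet? c.1 (-1) == some (lo1, p.1) then
            acc2 ++ [(c.1 ++ [(lo2, nt2)], c.2 + pvA_ov p.2 rl2)]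
          else acc2) acc) []

-- one iteration of the outer loop: builds connected_reads_new
-- ('if site2_path != []' is fused with taking sorted(site2_path)[0]: sorted [] = [])
def pvA_step (first : Bool) (cr : List (List (String × String) × Int))
    (s1 s2 : String × List (String × List String)) :
    List (List (String × String) × Int) :=
  s2.2.foldl (fun news p2 =>
    match PySem.List.sorted (pvA_site2path first cr s1.1 s2.1 s1.2 p2.1 p2.2)
        (fun x => x.2) true with
    | [] => news
    | best :: _ => news ++ [best]) []

-- for sv_site_i in range(len(sv_lst) - 1): consecutive pairs; 'first' tracks sv_site_i == 0
def pvA_loop (first : Bool) (cr : List (List (String × String) × Int)) :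
    List (String × (List (String × List String))) → List (List (String × String) × Int)
  | s1 :: s2 :: rest => pvA_loop false (pvA_step first cr s1 s2) (s2 :: rest)
  | _ => cr

def extract_heaviest_path (sv_lst : List (String × (List (String × List String)))) : List (String × String) :=
  match PySem.List.sorted (pvA_loop true [] sv_lst) (fun x => x.2) true with
  | best :: _ => best.1
  | [] => []

-- ===== PORT B =====
-- a parent-pointer chain: Python's nested tuples (lo, nt, weight, parent-or-None)
inductive PvChain where
  | none : PvChain
  | node : String → String → Int → PvChain → PvChain
deriving DecidableEq, Repr

-- e[1] and e[2] of a chain entry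
def pvNt : PvChain → String
  | .none => ""
  | .node _ nt _ _ => nt

def pvW : PvChain → Int
  | .none => 0
  | .node _ _ w _ => w

def pvB_ov (rl1 rl2 : List String) : Int :=
  ((rl1 ++ rl2).length : Int) - ((PySem.Set.ofList (rl1 ++ rl2)).length : Int)

-- best_at: first heaviest previous entry per last nt
def pvB_index (prev : List PvChain) : PySem.Dict String PvChain :=
  prev.foldl (fun d e =>
    match d.get? (pvNt e) with
    | Option.none => d.insert (pvNt e) e
    | Option.some b => if pvW b < pvW e then d.insert (pvNt e) e else d) ⟨[]⟩

-- the inner 'best' scan for one (nt2, rl2)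
def pvB_inner (idx : PySem.Dict String PvChain) (lo2 : String)
    (site1 : List (String × List String)) (nt2 : String) (rl2 : List String) :
    Option PvChain :=
  site1.foldl (fun best p =>
    match idx.get? p.1 with
    | Option.none => best
    | Option.some e =>
        match best with
        | Option.none => some (PvChain.node lo2 nt2 (pvW e + pvB_ov p.2 rl2) e)
        | Option.some b =>
            if pvW b < pvW e + pvB_ov p.2 rl2 then
              some (PvChain.node lo2 nt2 (pvW e + pvB_ov p.2 rl2) e)
            else some b) Option.none

-- one step of the pair loop: the new layer 'cur'
def pvB_step (prev : List PvChain) (s1 s2 : String × List (String × List String)) :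
    List PvChain :=
  s2.2.foldl (fun cur p2 =>
    match pvB_inner (pvB_index prev) s2.1 s1.2 p2.1 p2.2 with
    | Option.some b => cur ++ [b]
    | Option.none => cur) []

-- for (lo1, site1), (lo2, site2) in zip(sv_lst, sv_lst[1:])
def pvB_loop (prev : List PvChain) :
    List (String × (List (String × List String))) → List PvChain
  | s1 :: s2 :: rest => pvB_loop (pvB_step prev s1 s2) (s2 :: rest)
  | _ => prev

-- the final while-loop collecting (lo, nt) down the chain (path before reversal)
def pvWalk : PvChain → List (String × String)
  | .none => []
  | .node lo nt _ p => (lo, nt) :: pvWalk p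

def extract_heaviest_path_alt (sv_lst : List (String × (List (String × List String)))) : List (String × String) :=
  if sv_lst.length < 2 ∨ (sv_lst.any (fun s => s.1 == "|")) = true then []
  else
    let s0 := sv_lst.headD ("", [])
    let prev0 := s0.2.map (fun p => PvChain.node s0.1 p.1 0 PvChain.none)
    match (pvB_loop prev0 sv_lst).foldl (fun best e =>
        match best with
        | Option.none => some e
        | Option.some b => if pvW b < pvW e then some e else some b) Option.none with
    | Option.some b => (pvWalk b).reverse
    | Option.none => []

-- ===== PRECONDITION & SPEC =====
def Spec_extract_heaviest_path (sv_lst : List (String × (List (String × List String)))) (out : List (String × String)) : Prop := out = extract_heaviest_path_alt sv_lst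
instance (sv_lst : List (String × (List (String × List String)))) (out : List (String × String)) : Decidable (Spec_extract_heaviest_path sv_lst out) := by unfold Spec_extract_heaviest_path; infer_instance

-- ===== CLAIM (what is proved, stated in full; the proofs are below) =====
def Claim_equal_extract_heaviest_path : Prop := ∀ (sv_lst : List (String × (List (String × List String)))), Dom_extract_heaviest_path sv_lst → Spec_extract_heaviest_path sv_lst (extract_heaviest_path sv_lst)

-- ===== LEMMAS AND PROOFS =====

-- A's view of a chain entry: (the path it encodes, its weight)
def pvToA (e : PvChain) : List (String × String) × Int := ((pvWalk e).reverse, pvW e)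

-- a chain entry of the layer ending at a site labelled lo
def pvIsNode (lo : String) (e : PvChain) : Prop := ∃ nt w p, e = PvChain.node lo nt w p

-- the last node of a path (paths in play are always nonempty)
def pvLast (c : List (String × String) × Int) : String × String := c.1.getLastD ("", "")

theorem pvNt_node (lo nt : String) (w : Int) (p : PvChain) :
    pvNt (PvChain.node lo nt w p) = nt := rfl

-- path[-1] on a nonempty path
theorem pv_pyGet_neg_one {a : Type} [Inhabited a] (l : List a) (h : l ≠ []) :
    PySem.List.pyGet? l (-1) = some (l.getLastD default) := by
  rcases List.exists_cons_of_ne_nil h with ⟨x, t, rfl⟩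
  simp [PySem.List.pyGet?, PySem.List.pyIdx?, List.getLastD_eq_getLast?,
    List.getLast?_eq_getElem?]

-- the accumulator step of PySem.List.max?
def pvMaxStep {a : Type} (key : a → Int) (acc : Option a) (x : a) : Option a :=
  match acc with
  | none => some x
  | some m => if key m < key x then some x else some m

theorem pv_insertBy_head {a : Type} (key : a → Int) (x : a) (acc : List a) :
    (PySem.List.insertBy (fun p q => decide (key q < key p)) x acc).head? =
      pvMaxStep key acc.head? x := by
  cases acc with
  | nil => simp [PySem.List.insertBy, pvMaxStep]
  | cons y ys =>
      simp only [PySem.List.insertBy, pvMaxStep, List.head?_cons]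
      split_ifs with h₁ h₂ h₂ <;> simp_all

theorem pv_foldl_insertBy_head {a : Type} (key : a → Int) (xs : List a) (acc : List a) :
    (xs.foldl (fun acc x => PySem.List.insertBy (fun p q => decide (key q < key p)) x acc) acc).head? =
      xs.foldl (pvMaxStep key) acc.head? := by
  induction xs generalizing acc with
  | nil => rfl
  | cons x t ih => simp only [List.foldl_cons, ih, pv_insertBy_head]

-- the head of Python's stable descending sort is the FIRST maximum
theorem pv_sorted_rev_head {a : Type} (key : a → Int) (xs : List a) :
    (PySem.List.sorted xs key true).head? = PySem.List.max? xs key := by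
  have h := pv_foldl_insertBy_head key xs []
  simp only [PySem.List.sorted, PySem.List.max?]
  exact h

theorem pv_max?_eq_foldl {a : Type} (key : a → Int) (xs : List a) :
    PySem.List.max? xs key = xs.foldl (pvMaxStep key) none := rfl

-- the binary first-maximum (max?'s step on a some-accumulator)
def pvOp {a : Type} (key : a → Int) (m x : a) : a := if key m < key x then x else m

theorem pv_maxStep_some {a : Type} (key : a → Int) (m x : a) :
    pvMaxStep key (some m) x = some (pvOp key m x) := by
  simp only [pvMaxStep, pvOp]
  split_ifs <;> rfl

theorem pv_foldl_maxStep_some {a : Type} (key : a → Int) (xs : List a) (m : a) :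
    xs.foldl (pvMaxStep key) (some m) = some (xs.foldl (pvOp key) m) := by
  induction xs generalizing m with
  | nil => rfl
  | cons x t ih => simp only [List.foldl_cons, pv_maxStep_some, ih]

theorem pv_op_assoc {a : Type} (key : a → Int) (x y z : a) :
    pvOp key (pvOp key x y) z = pvOp key x (pvOp key y z) := by
  simp only [pvOp]
  split_ifs <;> first | rfl | omega

theorem pv_foldl_op_acc {a : Type} (key : a → Int) (xs : List a) (m x : a) :
    xs.foldl (pvOp key) (pvOp key m x) = pvOp key m (xs.foldl (pvOp key) x) := by
  induction xs generalizing x with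
  | nil => rfl
  | cons y t ih => simp only [List.foldl_cons, pv_op_assoc, ih]

-- folding a block through an order-preserving map h
theorem pv_op_map {a b : Type} (key : a → Int) (key' : b → Int) (h : b → a)
    (hpres : ∀ p q : b, key (h p) < key (h q) ↔ key' p < key' q) (x y : b) :
    pvOp key (h x) (h y) = h (pvOp key' x y) := by
  simp only [pvOp, hpres]
  split_ifs <;> rfl

theorem pv_foldl_op_map {a b : Type} (key : a → Int) (key' : b → Int) (h : b → a)
    (hpres : ∀ p q : b, key (h p) < key (h q) ↔ key' p < key' q) (xs : List b) (x : b) :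
    (xs.map h).foldl (pvOp key) (h x) = h (xs.foldl (pvOp key') x) := by
  induction xs generalizing x with
  | nil => rfl
  | cons y t ih => simp only [List.map_cons, List.foldl_cons, pv_op_map key key' h hpres, ih]

-- THE DOMINANCE LEMMA: running max? through a whole mapped block equals one step
-- with the block's first maximum (extending a group shifts all weights equally)
theorem pv_block {a b : Type} (key : a → Int) (key' : b → Int) (h : b → a)
    (hpres : ∀ p q : b, key (h p) < key (h q) ↔ key' p < key' q)
    (g : List b) (acc : Option a) :
    (g.map h).foldl (pvMaxStep key) acc =
      match PySem.List.max? g key' with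
      | none => acc
      | some rep => pvMaxStep key acc (h rep) := by
  cases g with
  | nil => rfl
  | cons b0 bt =>
      have hmax : PySem.List.max? (b0 :: bt) key' = some (bt.foldl (pvOp key') b0) := by
        rw [pv_max?_eq_foldl, List.foldl_cons]
        exact pv_foldl_maxStep_some key' bt b0
      rw [hmax]
      cases acc with
      | none =>
          simp only [List.map_cons, List.foldl_cons]
          show (bt.map h).foldl (pvMaxStep key) (some (h b0)) = pvMaxStep key none (h (bt.foldl (pvOp key') b0))
          rw [pv_foldl_maxStep_some, pv_foldl_op_map key key' h hpres]
          rfl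
      | some m =>
          simp only [List.map_cons, List.foldl_cons, pv_maxStep_some]
          rw [pv_foldl_maxStep_some, pv_foldl_op_acc, pv_foldl_op_map key key' h hpres]

-- weights are preserved by pvToA
theorem pv_toA_w (e : PvChain) : (pvToA e).2 = pvW e := rfl

-- pvMaxStep commutes with pvToA
theorem pv_maxStep_toA (acc : Option PvChain) (x : PvChain) :
    pvMaxStep (fun c : List (String × String) × Int => c.2) (acc.map pvToA) (pvToA x)
      = (pvMaxStep pvW acc x).map pvToA := by
  cases acc with
  | none => rfl
  | some m =>
      simp only [Option.map_some, pvMaxStep, pv_toA_w]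
      split_ifs <;> rfl

-- max? commutes with pvToA
theorem pv_max?_toA (l : List PvChain) :
    PySem.List.max? (l.map pvToA) (fun c => c.2) = (PySem.List.max? l pvW).map pvToA := by
  rw [pv_max?_eq_foldl, pv_max?_eq_foldl]
  suffices h : ∀ acc : Option PvChain,
      (l.map pvToA).foldl (pvMaxStep (fun c : List (String × String) × Int => c.2)) (acc.map pvToA)
        = (l.foldl (pvMaxStep pvW) acc).map pvToA by
    exact h none
  induction l with
  | nil => intro acc; rfl
  | cons e t ih =>
      intro acc
      simp only [List.map_cons, List.foldl_cons, pv_maxStep_toA, ih]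

-- membership in a max?
theorem pv_max?_ne_nil {a : Type} (key : a → Int) (xs : List a) (h : xs ≠ []) :
    ∃ m, PySem.List.max? xs key = some m := by
  rcases List.exists_cons_of_ne_nil h with ⟨x, t, rfl⟩
  rw [pv_max?_eq_foldl, List.foldl_cons]
  exact ⟨_, pv_foldl_maxStep_some key t x⟩

-- the index holds, per nt, the first heaviest previous entry with that last nt
theorem pv_index_fold (l : List PvChain) :
    ∀ (done : List PvChain) (d : PySem.Dict String PvChain),
    (∀ k, d.get? k = PySem.List.max? (done.filter (fun e => pvNt e == k)) pvW) →
    ∀ k, (l.foldl (fun d e =>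
        match d.get? (pvNt e) with
        | Option.none => d.insert (pvNt e) e
        | Option.some b => if pvW b < pvW e then d.insert (pvNt e) e else d) d).get? k
      = PySem.List.max? ((done ++ l).filter (fun e => pvNt e == k)) pvW := by
  induction l with
  | nil => intro done d h k; simpa using h k
  | cons e t ih =>
      intro done d h k
      simp only [List.foldl_cons]
      have h' : ∀ k, (match d.get? (pvNt e) with
          | Option.none => d.insert (pvNt e) e
          | Option.some b => if pvW b < pvW e then d.insert (pvNt e) e else d).get? k
          = PySem.List.max? ((done ++ [e]).filter (fun e => pvNt e == k)) pvW := by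
        intro k
        rw [List.filter_append, pv_max?_eq_foldl, List.foldl_append, ← pv_max?_eq_foldl]
        by_cases hk : pvNt e = k
        · subst hk
          have hfb : [e].filter (fun x => pvNt x == pvNt e) = [e] := by simp
          rw [hfb, h (pvNt e)]
          cases hcur : PySem.List.max? (done.filter (fun x => pvNt x == pvNt e)) pvW with
          | none => simp [PySem.Dict.get?_insert_self, pvMaxStep]
          | some cur =>
              simp only [List.foldl_cons, List.foldl_nil, pv_maxStep_some]
              by_cases hlt : pvW cur < pvW e
              · rw [if_pos hlt, PySem.Dict.get?_insert_self]
                simp [pvOp, hlt]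
              · rw [if_neg hlt, h (pvNt e), hcur]
                simp [pvOp, hlt]
        · have hfb : [e].filter (fun x => pvNt x == k) = [] := by
            simp only [List.filter_cons, List.filter_nil]
            rw [if_neg (by simpa using hk)]
          rw [hfb, List.foldl_nil, ← h k]
          cases d.get? (pvNt e) with
          | none => exact PySem.Dict.get?_insert_of_ne d e (Ne.symm hk)
          | some cur =>
              show (if pvW cur < pvW e then d.insert (pvNt e) e else d).get? k = d.get? k
              by_cases hlt : pvW cur < pvW e
              · rw [if_pos hlt]
                exact PySem.Dict.get?_insert_of_ne d e (Ne.symm hk)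
              · rw [if_neg hlt]
      have := ih (done ++ [e]) _ h' k
      simpa [List.append_assoc] using this
theorem pv_index_spec (prev : List PvChain) (k : String) :
    (pvB_index prev).get? k = PySem.List.max? (prev.filter (fun e => pvNt e == k)) pvW := by
  have := pv_index_fold prev [] ⟨[]⟩ (fun k => rfl) k
  simpa using this

-- filtering A's layer by last node = filtering B's layer by last nt, mapped
theorem pv_filter_toA (prev : List PvChain) (lo1 nt : String)
    (hgood : ∀ e ∈ prev, pvIsNode lo1 e) :
    (prev.map pvToA).filter (fun c => pvLast c == (lo1, nt))
      = (prev.filter (fun e => pvNt e == nt)).map pvToA := by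
  induction prev with
  | nil => rfl
  | cons e t ih =>
      obtain ⟨nt', w, p, rfl⟩ := hgood e (by simp)
      have ht := ih (fun x hx => hgood x (by simp [hx]))
      have hlast : pvLast (pvToA (PvChain.node lo1 nt' w p)) = (lo1, nt') := by
        simp [pvToA, pvLast, pvWalk, List.getLastD_eq_getLast?, List.getLast?_reverse]
      simp only [List.map_cons, List.filter_cons, hlast, pvNt_node]
      have hbeq : (((lo1, nt') == (lo1, nt)) = (nt' == nt)) := by
        by_cases h : nt' = nt <;> simp [h]
      rw [hbeq]
      by_cases hnn : (nt' == nt) = true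
      · rw [if_pos hnn, if_pos hnn, List.map_cons, ht]
      · rw [if_neg hnn, if_neg hnn, ht]

-- A's site2_path at a non-first step, written as groups of the previous layer
theorem pv_A_flat (cr : List (List (String × String) × Int)) (lo1 lo2 : String)
    (site1 : List (String × List String)) (nt2 : String) (rl2 : List String)
    (hbar : (lo1 == "|" || lo2 == "|") = false)
    (hne : ∀ c ∈ cr, c.1 ≠ []) :
    pvA_site2path false cr lo1 lo2 site1 nt2 rl2
      = site1.flatMap (fun p =>
          (cr.filter (fun c => pvLast c == (lo1, p.1))).map
            (fun c => (c.1 ++ [(lo2, nt2)], c.2 + pvA_ov p.2 rl2))) := by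
  simp only [pvA_site2path, hbar, Bool.false_eq_true, if_false]
  have hin : ∀ (p : String × List String) (acc : List (List (String × String) × Int)),
      cr.foldl (fun acc2 c =>
          if PySem.List.pyGet? c.1 (-1) == some (lo1, p.1) then
            acc2 ++ [(c.1 ++ [(lo2, nt2)], c.2 + pvA_ov p.2 rl2)]
          else acc2) acc
        = acc ++ (cr.filter (fun c => pvLast c == (lo1, p.1))).map
            (fun c => (c.1 ++ [(lo2, nt2)], c.2 + pvA_ov p.2 rl2)) := by
    intro p acc
    have hcongr : cr.foldl (fun acc2 c =>
          if PySem.List.pyGet? c.1 (-1) == some (lo1, p.1) then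
            acc2 ++ [(c.1 ++ [(lo2, nt2)], c.2 + pvA_ov p.2 rl2)]
          else acc2) acc
        = cr.foldl (fun acc2 c =>
          if pvLast c == (lo1, p.1) then
            acc2 ++ [(c.1 ++ [(lo2, nt2)], c.2 + pvA_ov p.2 rl2)]
          else acc2) acc := by
      apply PySem.List.foldl_congr_mem
      intro acc2 c hc
      rw [pv_pyGet_neg_one c.1 (hne c hc)]
      rfl
    rw [hcongr, PySem.List.foldl_append_if]
  simp only [hin, PySem.List.foldl_append_eq_flatMap, List.nil_append]

-- extending a chain, seen on the A side
theorem pv_toA_node (lo2 nt2 : String) (w : Int) (e : PvChain) :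
    pvToA (PvChain.node lo2 nt2 w e) = ((pvWalk e).reverse ++ [(lo2, nt2)], w) := by
  simp [pvToA, pvWalk, pvW]

-- non-first step: A's candidate-list first maximum = B's inner scan, mapped
theorem pv_cands_eq (prev : List PvChain) (lo1 lo2 : String)
    (site1 : List (String × List String)) (nt2 : String) (rl2 : List String)
    (hbar : (lo1 == "|" || lo2 == "|") = false)
    (hgood : ∀ e ∈ prev, pvIsNode lo1 e) :
    PySem.List.max? (pvA_site2path false (prev.map pvToA) lo1 lo2 site1 nt2 rl2)
        (fun c => c.2)
      = (pvB_inner (pvB_index prev) lo2 site1 nt2 rl2).map pvToA := by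
  have hne : ∀ c ∈ prev.map pvToA, c.1 ≠ [] := by
    intro c hc
    simp only [List.mem_map] at hc
    obtain ⟨e, he, rfl⟩ := hc
    obtain ⟨nt', w, p, rfl⟩ := hgood e he
    simp [pvToA, pvWalk]
  rw [pv_A_flat (prev.map pvToA) lo1 lo2 site1 nt2 rl2 hbar hne]
  rw [pv_max?_eq_foldl]
  simp only [pvB_inner]
  suffices h : ∀ acc : Option PvChain,
      (site1.flatMap (fun p =>
          ((prev.map pvToA).filter (fun c => pvLast c == (lo1, p.1))).map
            (fun c => (c.1 ++ [(lo2, nt2)], c.2 + pvA_ov p.2 rl2)))).foldl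
        (pvMaxStep (fun c : List (String × String) × Int => c.2)) (acc.map pvToA)
      = (site1.foldl (fun best p =>
          match (pvB_index prev).get? p.1 with
          | Option.none => best
          | Option.some e =>
              match best with
              | Option.none => some (PvChain.node lo2 nt2 (pvW e + pvB_ov p.2 rl2) e)
              | Option.some b =>
                  if pvW b < pvW e + pvB_ov p.2 rl2 then
                    some (PvChain.node lo2 nt2 (pvW e + pvB_ov p.2 rl2) e)
                  else some b) acc).map pvToA by
    exact h none
  induction site1 with
  | nil => intro acc; rfl
  | cons p t ih =>
      intro acc
      simp only [List.flatMap_cons, List.foldl_cons, List.foldl_append]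
      rw [pv_filter_toA prev lo1 p.1 hgood, List.map_map]
      rw [pv_block (fun c : List (String × String) × Int => c.2) pvW
        ((fun c : List (String × String) × Int => (c.1 ++ [(lo2, nt2)], c.2 + pvA_ov p.2 rl2)) ∘ pvToA)
        (by intro x y; simp only [Function.comp_apply, pv_toA_w]; omega)
        (prev.filter (fun e => pvNt e == p.1)) (acc.map pvToA)]
      simp only [Function.comp_apply]
      rw [← pv_index_spec prev p.1]
      cases hg : (pvB_index prev).get? p.1 with
      | none => exact ih acc
      | some e =>
          dsimp only
          have hstep : pvMaxStep (fun c : List (String × String) × Int => c.2) (acc.map pvToA)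
              ((pvToA e).1 ++ [(lo2, nt2)], (pvToA e).2 + pvA_ov p.2 rl2)
              = (pvMaxStep pvW acc (PvChain.node lo2 nt2 (pvW e + pvB_ov p.2 rl2) e)).map pvToA := by
            have hx : ((pvToA e).1 ++ [(lo2, nt2)], (pvToA e).2 + pvA_ov p.2 rl2)
                = pvToA (PvChain.node lo2 nt2 (pvW e + pvB_ov p.2 rl2) e) := by
              rw [pv_toA_node]
              rfl
            rw [hx, pv_maxStep_toA]
          rw [hstep]
          have := ih (pvMaxStep pvW acc (PvChain.node lo2 nt2 (pvW e + pvB_ov p.2 rl2) e))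
          rw [this]
          congr 1
          cases acc <;> rfl

-- first step: A's candidate list over site1 vs B's inner scan on the seed layer
theorem pv_cands_eq_first (cr : List (List (String × String) × Int))
    (lo1 lo2 : String) (site1 : List (String × List String)) (nt2 : String) (rl2 : List String)
    (hbar : (lo1 == "|" || lo2 == "|") = false) :
    PySem.List.max? (pvA_site2path true cr lo1 lo2 site1 nt2 rl2) (fun c => c.2)
      = (pvB_inner (pvB_index (site1.map (fun q => PvChain.node lo1 q.1 0 PvChain.none)))
          lo2 site1 nt2 rl2).map pvToA := by
  have hflat : pvA_site2path true cr lo1 lo2 site1 nt2 rl2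
      = site1.map (fun p => ([(lo1, p.1), (lo2, nt2)], pvA_ov p.2 rl2)) := by
    simp only [pvA_site2path, hbar, Bool.false_eq_true, if_false, if_true,
      PySem.List.foldl_append_singleton_eq_map, List.nil_append]
  rw [hflat, pv_max?_eq_foldl]
  simp only [pvB_inner]
  -- every p.1 of site1 is in the seed index, with weight 0 and the right path
  have hidx : ∀ p ∈ site1, ∃ e, (pvB_index (site1.map (fun q => PvChain.node lo1 q.1 0 PvChain.none))).get? p.1 = some e
      ∧ pvW e = 0 ∧ pvToA e = ([(lo1, p.1)], 0) := by
    intro p hp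
    rw [pv_index_spec]
    have hmem : PvChain.node lo1 p.1 0 PvChain.none
        ∈ (site1.map (fun q => PvChain.node lo1 q.1 0 PvChain.none)).filter
            (fun e => pvNt e == p.1) := by
      rw [List.mem_filter]
      exact ⟨List.mem_map_of_mem hp, by simp [pvNt]⟩
    obtain ⟨m, hm⟩ := pv_max?_ne_nil pvW _ (List.ne_nil_of_mem hmem)
    refine ⟨m, hm, ?_⟩
    have hmmem := PySem.List.max?_mem hm
    rw [List.mem_filter] at hmmem
    obtain ⟨hmem', hnt⟩ := hmmem
    simp only [List.mem_map] at hmem'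
    obtain ⟨q, _, rfl⟩ := hmem'
    simp only [pvNt, beq_iff_eq] at hnt
    rw [hnt]
    exact ⟨rfl, by simp [pvToA, pvWalk, pvW]⟩
  suffices h : ∀ acc : Option PvChain,
      (∀ p ∈ site1, ∃ e, (pvB_index (site1.map (fun q => PvChain.node lo1 q.1 0 PvChain.none))).get? p.1 = some e
        ∧ pvW e = 0 ∧ pvToA e = ([(lo1, p.1)], 0)) →
      (site1.map (fun p => ([(lo1, p.1), (lo2, nt2)], pvA_ov p.2 rl2))).foldl
        (pvMaxStep (fun c : List (String × String) × Int => c.2)) (acc.map pvToA)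
      = (site1.foldl (fun best p =>
          match (pvB_index (site1.map (fun q => PvChain.node lo1 q.1 0 PvChain.none))).get? p.1 with
          | Option.none => best
          | Option.some e =>
              match best with
              | Option.none => some (PvChain.node lo2 nt2 (pvW e + pvB_ov p.2 rl2) e)
              | Option.some b =>
                  if pvW b < pvW e + pvB_ov p.2 rl2 then
                    some (PvChain.node lo2 nt2 (pvW e + pvB_ov p.2 rl2) e)
                  else some b) acc).map pvToA by
    exact h none hidx
  clear hidx hflat
  generalize pvB_index (site1.map (fun q => PvChain.node lo1 q.1 0 PvChain.none)) = I
  induction site1 with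
  | nil => intro acc _; rfl
  | cons p t ih =>
      intro acc hidx
      obtain ⟨e, hge, hw0, hwalk⟩ := hidx p (by simp)
      simp only [List.map_cons, List.foldl_cons, hge]
      have hx : ([(lo1, p.1), (lo2, nt2)], pvA_ov p.2 rl2)
          = pvToA (PvChain.node lo2 nt2 (pvW e + pvB_ov p.2 rl2) e) := by
        rw [pv_toA_node]
        have h1 : (pvWalk e).reverse = [(lo1, p.1)] := congrArg Prod.fst hwalk
        rw [h1, hw0]
        show ([(lo1, p.1), (lo2, nt2)], pvA_ov p.2 rl2) = ([(lo1, p.1)] ++ [(lo2, nt2)], 0 + pvB_ov p.2 rl2)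
        simp [pvA_ov, pvB_ov]
      rw [hx, pv_maxStep_toA]
      have := ih (pvMaxStep pvW acc (PvChain.node lo2 nt2 (pvW e + pvB_ov p.2 rl2) e))
        (fun q hq => hidx q (List.mem_cons_of_mem _ hq))
      rw [this]
      congr 1
      cases acc <;> rfl

-- shape of an inner-scan result
theorem pv_inner_shape (idx : PySem.Dict String PvChain) (lo2 : String)
    (site1 : List (String × List String)) (nt2 : String) (rl2 : List String) :
    ∀ b, pvB_inner idx lo2 site1 nt2 rl2 = some b → pvIsNode lo2 b := by
  simp only [pvB_inner]
  suffices h : ∀ (acc : Option PvChain),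
      (∀ b, acc = some b → pvIsNode lo2 b) →
      ∀ b, site1.foldl (fun best p =>
          match idx.get? p.1 with
          | Option.none => best
          | Option.some e =>
              match best with
              | Option.none => some (PvChain.node lo2 nt2 (pvW e + pvB_ov p.2 rl2) e)
              | Option.some b =>
                  if pvW b < pvW e + pvB_ov p.2 rl2 then
                    some (PvChain.node lo2 nt2 (pvW e + pvB_ov p.2 rl2) e)
                  else some b) acc = some b → pvIsNode lo2 b by
    exact h none (by intro b hb; cases hb)
  induction site1 with
  | nil => intro acc h b hb; exact h b hb
  | cons p t ih =>
      intro acc h b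
      simp only [List.foldl_cons]
      apply ih
      intro b' hb'
      cases hg : idx.get? p.1 with
      | none => rw [hg] at hb'; exact h b' hb'
      | some e =>
          rw [hg] at hb'
          cases acc with
          | none =>
              simp only at hb'
              cases hb'
              exact ⟨nt2, _, e, rfl⟩
          | some m =>
              simp only at hb'
              split_ifs at hb' <;> cases hb'
              · exact ⟨nt2, _, e, rfl⟩
              · exact h _ rfl

-- one step of the loops, given equal candidate maxima per site-2 node
theorem pv_step_eq_of (first : Bool) (cr : List (List (String × String) × Int))
    (prev : List PvChain) (s1 s2 : String × List (String × List String))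
    (hc : ∀ nt2 rl2, PySem.List.max? (pvA_site2path first cr s1.1 s2.1 s1.2 nt2 rl2)
        (fun c => c.2)
      = (pvB_inner (pvB_index prev) s2.1 s1.2 nt2 rl2).map pvToA) :
    pvA_step first cr s1 s2 = (pvB_step prev s1 s2).map pvToA
      ∧ ∀ e ∈ pvB_step prev s1 s2, pvIsNode s2.1 e := by
  unfold pvA_step pvB_step
  suffices h : ∀ (l : List (String × List String)) (curB : List PvChain),
      (l.foldl (fun news p2 =>
        match PySem.List.sorted (pvA_site2path first cr s1.1 s2.1 s1.2 p2.1 p2.2)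
            (fun x => x.2) true with
        | [] => news
        | best :: _ => news ++ [best]) (curB.map pvToA))
      = ((l.foldl (fun cur p2 =>
          match pvB_inner (pvB_index prev) s2.1 s1.2 p2.1 p2.2 with
          | Option.some b => cur ++ [b]
          | Option.none => cur) curB).map pvToA)
      ∧ ∀ e, (∀ x ∈ curB, pvIsNode s2.1 x) →
        e ∈ (l.foldl (fun cur p2 =>
          match pvB_inner (pvB_index prev) s2.1 s1.2 p2.1 p2.2 with
          | Option.some b => cur ++ [b]
          | Option.none => cur) curB) → pvIsNode s2.1 e by
    obtain ⟨h1, h2⟩ := h s2.2 []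
    exact ⟨by simpa using h1, fun e he => h2 e (by simp) he⟩
  intro l
  induction l with
  | nil => intro curB; exact ⟨rfl, fun e h he => h e he⟩
  | cons q t ih =>
      intro curB
      simp only [List.foldl_cons]
      have hhead := pv_sorted_rev_head (fun x : List (String × String) × Int => x.2)
        (pvA_site2path first cr s1.1 s2.1 s1.2 q.1 q.2)
      rw [hc q.1 q.2] at hhead
      cases hm : pvB_inner (pvB_index prev) s2.1 s1.2 q.1 q.2 with
      | none =>
          rw [hm] at hhead
          cases hs : PySem.List.sorted (pvA_site2path first cr s1.1 s2.1 s1.2 q.1 q.2)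
              (fun x : List (String × String) × Int => x.2) true with
          | nil => exact ih curB
          | cons bb bt => rw [hs] at hhead; simp at hhead
      | some b =>
          rw [hm] at hhead
          cases hs : PySem.List.sorted (pvA_site2path first cr s1.1 s2.1 s1.2 q.1 q.2)
              (fun x : List (String × String) × Int => x.2) true with
          | nil => rw [hs] at hhead; simp at hhead
          | cons bb bt =>
              rw [hs] at hhead
              simp only [List.head?_cons, Option.map_some, Option.some.injEq] at hhead
              obtain rfl : bb = pvToA b := hhead
              dsimp only
              have hmap : curB.map pvToA ++ [pvToA b] = (curB ++ [b]).map pvToA := by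
                simp
              rw [hmap]
              obtain ⟨h1, h2⟩ := ih (curB ++ [b])
              refine ⟨h1, fun e h he => h2 e ?_ he⟩
              intro x hx
              rcases List.mem_append.mp hx with hx | hx
              · exact h x hx
              · rw [List.mem_singleton.mp hx]
                exact pv_inner_shape _ _ _ _ _ b hm
  
-- the tail of the loops, from matching states onwards
theorem pv_loop_eq (rest : List (String × (List (String × List String)))) :
    ∀ (s1 : String × (List (String × List String))) (prev : List PvChain),
    (∀ s ∈ s1 :: rest, (s.1 == "|") = false) →
    (∀ e ∈ prev, pvIsNode s1.1 e) →
    pvA_loop false (prev.map pvToA) (s1 :: rest) = (pvB_loop prev (s1 :: rest)).map pvToA := by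
  induction rest with
  | nil => intro s1 prev _ _; rfl
  | cons s2 rest2 ih =>
      intro s1 prev hnb hgood
      have hbar : (s1.1 == "|" || s2.1 == "|") = false := by
        have h1 := hnb s1 (by simp)
        have h2 := hnb s2 (by simp)
        simp [h1, h2]
      have hc := fun nt2 rl2 => pv_cands_eq prev s1.1 s2.1 s1.2 nt2 rl2 hbar hgood
      obtain ⟨h1, h2⟩ := pv_step_eq_of false (prev.map pvToA) prev s1 s2 hc
      show pvA_loop false (pvA_step false (prev.map pvToA) s1 s2) (s2 :: rest2)
        = (pvB_loop (pvB_step prev s1 s2) (s2 :: rest2)).map pvToA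
      rw [h1]
      exact ih s2 (pvB_step prev s1 s2) (fun s hs => hnb s (by simp at hs; rcases hs with h | h <;> simp [h])) h2

-- an empty layer can never refill
theorem pv_foldl_const {a b : Type} (l : List a) (acc : b) :
    l.foldl (fun acc _ => acc) acc = acc := by
  induction l generalizing acc with
  | nil => rfl
  | cons x t ih => simp [ih]

theorem pv_site2path_nil (lo1 lo2 : String) (site1 : List (String × List String))
    (nt2 : String) (rl2 : List String) :
    pvA_site2path false [] lo1 lo2 site1 nt2 rl2 = [] := by
  unfold pvA_site2path
  have hf : (fun (acc : List (List (String × String) × Int)) (p : String × List String) =>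
      if lo1 == "|" || lo2 == "|" then acc
      else
        if false = true then acc ++ [([(lo1, p.1), (lo2, nt2)], pvA_ov p.2 rl2)]
        else ([] : List (List (String × String) × Int)).foldl (fun acc2 c =>
          if PySem.List.pyGet? c.1 (-1) == some (lo1, p.1) then
            acc2 ++ [(c.1 ++ [(lo2, nt2)], c.2 + pvA_ov p.2 rl2)]
          else acc2) acc)
      = fun acc _ => acc := by
    funext acc p
    split_ifs with h1 h2
    · rfl
    · exact h2.elim
    · rfl
  rw [hf, pv_foldl_const]

theorem pv_step_nil (s1 s2 : String × List (String × List String)) :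
    pvA_step false [] s1 s2 = [] := by
  unfold pvA_step
  have hf : (fun (news : List (List (String × String) × Int)) (p2 : String × List String) =>
      match PySem.List.sorted (pvA_site2path false [] s1.1 s2.1 s1.2 p2.1 p2.2)
          (fun x => x.2) true with
      | [] => news
      | best :: _ => news ++ [best]) = fun news _ => news := by
    funext news p2
    rw [pv_site2path_nil]
    rfl
  rw [hf, pv_foldl_const]

theorem pv_loop_nil (sites : List (String × (List (String × List String)))) :
    pvA_loop false [] sites = [] := by
  induction sites with
  | nil => rfl
  | cons s1 rest ih =>
      cases rest with
      | nil => rfl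
      | cons s2 rest2 =>
          show pvA_loop false (pvA_step false [] s1 s2) (s2 :: rest2) = []
          rw [pv_step_nil]
          exact ih

-- a '|' site empties the step
theorem pv_step_bar (first : Bool) (cr : List (List (String × String) × Int))
    (s1 s2 : String × List (String × List String))
    (hbar : (s1.1 == "|" || s2.1 == "|") = true) :
    pvA_step first cr s1 s2 = [] := by
  simp only [pvA_step, pvA_site2path, hbar, if_true, pv_foldl_const]
  simp [PySem.List.sorted]

-- any '|' site among at least two sites makes A's final layer empty
theorem pv_bar_empty (sites : List (String × (List (String × List String)))) :
    ∀ (first : Bool) (cr : List (List (String × String) × Int)),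
    (∃ s ∈ sites, s.1 = "|") → 2 ≤ sites.length → pvA_loop first cr sites = [] := by
  induction sites with
  | nil => intro first cr h hl; simp at hl
  | cons s1 rest ih =>
      intro first cr hbar hl
      cases rest with
      | nil => simp at hl
      | cons s2 rest2 =>
          show pvA_loop false (pvA_step first cr s1 s2) (s2 :: rest2) = []
          by_cases hb : (s1.1 == "|" || s2.1 == "|") = true
          · rw [pv_step_bar first cr s1 s2 hb]
            cases rest2 with
            | nil => rfl
            | cons s3 rest3 => exact pv_loop_nil _
          · have hb' : s1.1 ≠ "|" ∧ s2.1 ≠ "|" := by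
              simp only [Bool.or_eq_true, beq_iff_eq] at hb
              push_neg at hb
              exact hb
            obtain ⟨s, hs, hseq⟩ := hbar
            simp only [List.mem_cons] at hs
            rcases hs with rfl | rfl | hs
            · exact absurd hseq hb'.1
            · exact absurd hseq hb'.2
            · have hlen : 2 ≤ (s2 :: rest2).length := by
                cases rest2 with
                | nil => simp at hs
                | cons _ _ => simp
              exact ih false _ ⟨s, by simp [hs], hseq⟩ hlen

-- ===== VERDICT (by name: the statement is the Claim_ definition above) =====
theorem extract_heaviest_path_spec : Claim_equal_extract_heaviest_path := by
  intro sv _hdom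
  unfold Spec_extract_heaviest_path extract_heaviest_path extract_heaviest_path_alt
  by_cases hg : sv.length < 2 ∨ (sv.any (fun s => s.1 == "|")) = true
  · rw [if_pos hg]
    have hnil : pvA_loop true [] sv = [] := by
      by_cases hlen : sv.length < 2
      · match sv, hlen with
        | [], _ => rfl
        | [s], _ => rfl
      · rcases hg with hl | hb
        · exact absurd hl hlen
        · simp only [List.any_eq_true, beq_iff_eq] at hb
          obtain ⟨s, hs, hseq⟩ := hb
          exact pv_bar_empty sv true [] ⟨s, hs, hseq⟩ (by omega)
    rw [hnil]
    simp [PySem.List.sorted]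
  · rw [if_neg hg]
    push_neg at hg
    obtain ⟨hl, hb⟩ := hg
    have hnb : ∀ s ∈ sv, (s.1 == "|") = false := by
      intro s hs
      by_contra h
      exact hb (List.any_eq_true.mpr ⟨s, hs, by simpa using h⟩)
    match sv, hl with
    | s1 :: s2 :: rest, _ =>
      have hbar : (s1.1 == "|" || s2.1 == "|") = false := by
        have h1 := hnb s1 (by simp)
        have h2 := hnb s2 (by simp)
        simp [h1, h2]
      -- the seed layer
      have hseed : ∀ e ∈ s1.2.map (fun p => PvChain.node s1.1 p.1 0 PvChain.none),
          pvIsNode s1.1 e := by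
        intro e he
        simp only [List.mem_map] at he
        obtain ⟨p, _, rfl⟩ := he
        exact ⟨p.1, 0, PvChain.none, rfl⟩
      have hc := fun nt2 rl2 => pv_cands_eq_first [] s1.1 s2.1 s1.2 nt2 rl2 hbar
      obtain ⟨h1, h2⟩ := pv_step_eq_of true []
        (s1.2.map (fun q => PvChain.node s1.1 q.1 0 PvChain.none)) s1 s2 hc
      have hloop : pvA_loop true [] (s1 :: s2 :: rest)
          = (pvB_loop (s1.2.map (fun q => PvChain.node s1.1 q.1 0 PvChain.none))
              (s1 :: s2 :: rest)).map pvToA := by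
        show pvA_loop false (pvA_step true [] s1 s2) (s2 :: rest)
          = (pvB_loop (pvB_step (s1.2.map (fun q => PvChain.node s1.1 q.1 0 PvChain.none)) s1 s2)
              (s2 :: rest)).map pvToA
        rw [h1]
        exact pv_loop_eq rest s2 _ (fun s hs => hnb s (by simp at hs; rcases hs with h | h <;> simp [h])) h2
      rw [hloop]
      -- final: sorted head of the mapped layer vs B's first-max fold
      have hfinal := pv_sorted_rev_head (fun x : List (String × String) × Int => x.2)
        ((pvB_loop (s1.2.map (fun q => PvChain.node s1.1 q.1 0 PvChain.none)) (s1 :: s2 :: rest)).map pvToA)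
      rw [pv_max?_toA] at hfinal
      have hBfold : (pvB_loop (s1.2.map (fun q => PvChain.node s1.1 q.1 0 PvChain.none))
            (s1 :: s2 :: rest)).foldl (fun best e =>
          match best with
          | Option.none => some e
          | Option.some b => if pvW b < pvW e then some e else some b) Option.none
          = PySem.List.max? (pvB_loop (s1.2.map (fun q => PvChain.node s1.1 q.1 0 PvChain.none))
              (s1 :: s2 :: rest)) pvW := by
        rw [pv_max?_eq_foldl]
        have hfun : (fun (best : Option PvChain) (e : PvChain) =>
            match best with
            | Option.none => some e
            | Option.some b => if pvW b < pvW e then some e else some b) = pvMaxStep pvW := by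
          funext acc e
          cases acc <;> rfl
        rw [hfun]
      simp only [List.headD]
      rw [hBfold]
      cases hM : PySem.List.max? (pvB_loop (s1.2.map (fun q => PvChain.node s1.1 q.1 0 PvChain.none))
          (s1 :: s2 :: rest)) pvW with
      | none =>
          rw [hM] at hfinal
          simp only [Option.map_none] at hfinal
          cases hs : PySem.List.sorted ((pvB_loop (s1.2.map (fun q => PvChain.node s1.1 q.1 0 PvChain.none)) (s1 :: s2 :: rest)).map pvToA) (fun x : List (String × String) × Int => x.2) true with
          | nil => rfl
          | cons b bt => rw [hs] at hfinal; simp at hfinal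
      | some b =>
          rw [hM] at hfinal
          cases hs : PySem.List.sorted ((pvB_loop (s1.2.map (fun q => PvChain.node s1.1 q.1 0 PvChain.none)) (s1 :: s2 :: rest)).map pvToA) (fun x : List (String × String) × Int => x.2) true with
          | nil => rw [hs] at hfinal; simp at hfinal
          | cons bb bt =>
              rw [hs] at hfinal
              simp only [List.head?_cons, Option.map_some, Option.some.injEq] at hfinal
              rw [hfinal]
              rfl
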